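-- pv_equiv track=rewrite | github.com/yeonnseok/ps-algorithm | 2019 baekjoon/BruteForce/2309_seven_dwarf.py | solve
-- ===== SOURCE A (Python) =====
-- def solve(src):
--     for i in range(len(src)):
--         for j in range(i + 1, len(src)):
--             total = 0
--             temp = []
--             for k in range(len(src)):
--                 if src[k] == src[i] or src[k] == src[j]:
--                     continue
--                 else:
--                     total += src[k]
--                     temp.append(src[k])
--             if total == 100:
--                 temp.sort()
--                 return temp
-- ===== SOURCE B (Python) =====
-- def solve(src):
--     # Precompute total and per-value counts so each pair is checked in O(1)
--     # instead of re-scanning the whole list: O(n^2) overall vs A's O(n^3).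
--     total = sum(src)
--     cnt = {}
--     for x in src:
--         cnt[x] = cnt.get(x, 0) + 1
--     n = len(src)
--     for i in range(n):
--         a = src[i]
--         for j in range(i + 1, n):
--             b = src[j]
--             rem = total - cnt[a] * a - (0 if a == b else cnt[b] * b)
--             if rem == 100:
--                 return sorted(x for x in src if x != a and x != b)
--     return None
-- ===== Notes on version B (the rewrite author's own statement) =====
-- stated objective: faster
-- what changed: B precomputes the list total and a value-count dictionary once, so each candidate pair is checked with an O(1) arithmetic lookup instead of A's full inner scan; only the single returned pair triggers one filter+sort.
import Mathlib
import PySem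

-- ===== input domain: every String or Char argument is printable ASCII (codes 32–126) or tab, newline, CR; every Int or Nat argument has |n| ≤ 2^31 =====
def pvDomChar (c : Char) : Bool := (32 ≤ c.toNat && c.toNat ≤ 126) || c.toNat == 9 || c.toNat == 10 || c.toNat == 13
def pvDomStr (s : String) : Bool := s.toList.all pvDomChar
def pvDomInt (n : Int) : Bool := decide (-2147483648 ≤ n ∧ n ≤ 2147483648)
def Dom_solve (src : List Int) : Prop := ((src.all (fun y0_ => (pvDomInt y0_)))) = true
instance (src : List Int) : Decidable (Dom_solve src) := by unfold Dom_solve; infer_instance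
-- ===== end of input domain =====

-- B changes A's per-pair full rescan (O(n^3)) into O(1) lookups against a precomputed
-- total and value counter (O(n^2)); return value identical on every input.

-- ===== PORT A =====
-- inner k-loop: 'for k in range(len(src)): if src[k]==a or src[k]==b: continue else: total+=src[k]; temp.append(src[k])'
-- (a loop over range(len(src)) reading src[k] is the fold over src)
def solveKLoop (src : List Int) (a b : Int) : Int × List Int :=
  src.foldl (fun st x => if x = a ∨ x = b then st else (st.1 + x, st.2 ++ [x])) (0, [])

-- j-loop over src[i+1:]: values vj = src[j]
def solveJLoop (src : List Int) (a : Int) : List Int → Option (List Int)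
  | [] => none
  | b :: rest =>
      let r := solveKLoop src a b
      if r.1 = 100 then some (PySem.List.sorted r.2 (fun x => x) false)
      else solveJLoop src a rest

-- i-loop over src: value a = src[i], with the suffix after i fed to the j-loop
def solveILoop (src : List Int) : List Int → Option (List Int)
  | [] => none
  | a :: rest =>
      match solveJLoop src a rest with
      | some r => some r
      | none => solveILoop src rest

def solve (src : List Int) : Option (List Int) := solveILoop src src

-- ===== PORT B =====
-- cnt = {}; for x in src: cnt[x] = cnt.get(x, 0) + 1
def altCnt (src : List Int) : PySem.Dict Int Int :=
  src.foldl (fun d x => d.insert x (d.getD x 0 + 1)) PySem.Dict.empty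

def altJLoop (src : List Int) (total : Int) (cnt : PySem.Dict Int Int) (a : Int) :
    List Int → Option (List Int)
  | [] => none
  | b :: rest =>
      let rem := total - cnt.getD a 0 * a - (if a = b then 0 else cnt.getD b 0 * b)
      if rem = 100 then
        some (PySem.List.sorted (src.filter (fun x => x ≠ a ∧ x ≠ b)) (fun x => x) false)
      else altJLoop src total cnt a rest

def altILoop (src : List Int) (total : Int) (cnt : PySem.Dict Int Int) :
    List Int → Option (List Int)
  | [] => none
  | a :: rest =>
      match altJLoop src total cnt a rest with
      | some r => some r
      | none => altILoop src total cnt rest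

def solve_alt (src : List Int) : Option (List Int) :=
  let total := src.foldl (· + ·) 0
  let cnt := altCnt src
  altILoop src total cnt src

-- ===== PRECONDITION & SPEC =====
def Spec_solve (src : List Int) (out : Option (List Int)) : Prop := out = solve_alt src
instance (src : List Int) (out : Option (List Int)) : Decidable (Spec_solve src out) := by unfold Spec_solve; infer_instance

-- ===== CLAIM (what is proved, stated in full; the proofs are below) =====
def Claim_equal_solve : Prop := ∀ (src : List Int), Dom_solve src → Spec_solve src (solve src)

-- ===== LEMMAS AND PROOFS =====

theorem foldl_add_init (l : List Int) (s : Int) : l.foldl (· + ·) s = s + l.foldl (· + ·) 0 := by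
  induction l generalizing s with
  | nil => simp
  | cons y ys ih => simp only [List.foldl_cons]; rw [ih (s + y), ih (0 + y)]; ring

theorem sum_cons (y : Int) (l : List Int) :
    (y :: l).foldl (· + ·) 0 = y + l.foldl (· + ·) 0 := by
  simp only [List.foldl_cons]
  rw [foldl_add_init l (0 + y)]; ring

theorem kloop_eq (src : List Int) (a b : Int) :
    solveKLoop src a b =
      ((src.filter (fun x => ¬(x = a ∨ x = b))).foldl (· + ·) 0,
       src.filter (fun x => ¬(x = a ∨ x = b))) := by
  unfold solveKLoop
  suffices h : ∀ (t : Int) (acc : List Int),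
      src.foldl (fun st x => if x = a ∨ x = b then st else (st.1 + x, st.2 ++ [x])) (t, acc) =
        (t + (src.filter (fun x => ¬(x = a ∨ x = b))).foldl (· + ·) 0,
         acc ++ src.filter (fun x => ¬(x = a ∨ x = b))) by
    simpa using h 0 []
  induction src with
  | nil => simp
  | cons x xs ih =>
      intro t acc
      by_cases hx : x = a ∨ x = b
      · have hq : (decide ¬(x = a ∨ x = b)) = false := by simp [hx]
        rw [List.filter_cons, hq]
        simp only [Bool.false_eq_true, if_false]
        rw [List.foldl_cons, if_pos hx]
        exact ih t acc
      · have hq : (decide ¬(x = a ∨ x = b)) = true := by simp [hx]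
        rw [List.filter_cons, hq, if_pos rfl, List.foldl_cons, if_neg hx, ih]
        refine Prod.ext ?_ ?_
        · show (t + x) + _ = t + _
          rw [sum_cons]; ring
        · show (acc ++ [x]) ++ _ = acc ++ _
          simp

theorem filtered_sum (src : List Int) (a b : Int) :
    (src.filter (fun x => ¬(x = a ∨ x = b))).foldl (· + ·) 0 =
      src.foldl (· + ·) 0 - (src.count a) * a -
        (if a = b then 0 else (src.count b) * b) := by
  induction src with
  | nil => simp
  | cons x xs ih =>
      by_cases hx : x = a ∨ x = b
      · have hq : (decide ¬(x = a ∨ x = b)) = false := by simp [hx]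
        rw [List.filter_cons, hq]
        simp only [Bool.false_eq_true, if_false]
        rw [sum_cons x xs]
        rcases hx with hxa | hxb
        · subst hxa
          by_cases hab : x = b
          · rw [if_pos hab] at ih ⊢
            simp only [List.count_cons, beq_self_eq_true, if_true]
            push_cast
            linear_combination ih
          · rw [if_neg hab] at ih ⊢
            simp only [List.count_cons, beq_self_eq_true, if_true,
              show (x == b) = false by simp [hab]]
            push_cast
            linear_combination ih
        · by_cases hxa : x = a
          · subst hxa
            have hab : x = b := hxb
            rw [if_pos hab] at ih ⊢
            simp only [List.count_cons, beq_self_eq_true, if_true]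
            push_cast
            linear_combination ih
          · subst hxb
            have hab : ¬ (a = x) := fun h => hxa h.symm
            rw [if_neg hab] at ih ⊢
            simp only [List.count_cons, beq_self_eq_true, if_true,
              show (x == a) = false by simp [hxa]]
            push_cast
            linear_combination ih
      · have hq : (decide ¬(x = a ∨ x = b)) = true := by simp [hx]
        rw [not_or] at hx
        have hax : ¬ (a = x) := fun h => hx.1 h.symm
        have hbx : ¬ (b = x) := fun h => hx.2 h.symm
        rw [List.filter_cons, hq, if_pos rfl, sum_cons, sum_cons x xs]
        simp only [List.count_cons, show (x == a) = false by simp [hx.1],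
          show (x == b) = false by simp [hx.2]]
        by_cases hab : a = b
        · rw [if_pos hab] at ih ⊢
          push_cast
          linear_combination ih
        · rw [if_neg hab] at ih ⊢
          push_cast
          linear_combination ih

theorem cnt_count (src : List Int) (v : Int) :
    (altCnt src).getD v 0 = src.count v := by
  unfold altCnt
  simpa using PySem.Dict.getD_foldl_insert_add_one (l := src) (d := PySem.Dict.empty) (v := v)

theorem filter_pred_eq (a b : Int) :
    (fun x : Int => decide ¬(x = a ∨ x = b)) = (fun x : Int => decide (x ≠ a ∧ x ≠ b)) := by
  funext x; simp [not_or]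

theorem jloop_eq (src : List Int) (a : Int) (js : List Int) :
    solveJLoop src a js =
      altJLoop src (src.foldl (· + ·) 0) (altCnt src) a js := by
  induction js with
  | nil => rfl
  | cons b rest ih =>
      show (let r := solveKLoop src a b
            if r.1 = 100 then some (PySem.List.sorted r.2 (fun x => x) false)
            else solveJLoop src a rest) = _
      rw [kloop_eq]
      show (if _ = 100 then _ else _) = _
      unfold altJLoop
      rw [cnt_count, cnt_count, filtered_sum src a b]
      by_cases hc : src.foldl (· + ·) 0 - (src.count a) * a -
          (if a = b then 0 else (src.count b) * b) = 100
      · rw [if_pos hc, if_pos hc]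
        show some (PySem.List.sorted (List.filter (fun x => decide ¬(x = a ∨ x = b)) src)
          (fun x => x) false) = _
        rw [filter_pred_eq]
      · rw [if_neg hc, if_neg hc, ih]

theorem iloop_eq (src : List Int) (is : List Int) :
    solveILoop src is = altILoop src (src.foldl (· + ·) 0) (altCnt src) is := by
  induction is with
  | nil => rfl
  | cons a rest ih =>
      simp only [solveILoop, altILoop, jloop_eq, ih]

-- ===== VERDICT (by name: the statement is the Claim_ definition above) =====
theorem solve_spec : Claim_equal_solve := by
  intro src _
  unfold Spec_solve solve solve_alt
  exact iloop_eq src src
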